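-- pv_equiv track=rewrite | github.com/SH312-code/Morphemes | main.py | data_collect
-- ===== SOURCE A (Python) =====
-- def data_collect(info: list):
--     defintions = []
--     terms = []
--     q = []
--     for i in range((len(info))):
--         if i % 2 == 0:
--             root = info[i] + " "
--             terms.append(root)
--         else:
--             defintions.append(info[i])
--     for i in range(len(terms)):
--         q.append([terms[i], defintions[i]])
--     return q
-- ===== SOURCE B (Python) =====
-- def data_collect(info: list):
--     q = []
--     i = 0
--     while i < len(info):
--         q.append([info[i] + " ", info[i + 1]])
--         i += 2
--     return q
-- ===== Notes on version B (the rewrite author's own statement) =====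
-- stated objective: simpler
-- what changed: A partitions the list into terms/definitions with an index-parity loop and then zips them with a second index loop; B is one strided pass that pairs each even-indexed element directly with the next element, with no intermediate lists.
import Mathlib
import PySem

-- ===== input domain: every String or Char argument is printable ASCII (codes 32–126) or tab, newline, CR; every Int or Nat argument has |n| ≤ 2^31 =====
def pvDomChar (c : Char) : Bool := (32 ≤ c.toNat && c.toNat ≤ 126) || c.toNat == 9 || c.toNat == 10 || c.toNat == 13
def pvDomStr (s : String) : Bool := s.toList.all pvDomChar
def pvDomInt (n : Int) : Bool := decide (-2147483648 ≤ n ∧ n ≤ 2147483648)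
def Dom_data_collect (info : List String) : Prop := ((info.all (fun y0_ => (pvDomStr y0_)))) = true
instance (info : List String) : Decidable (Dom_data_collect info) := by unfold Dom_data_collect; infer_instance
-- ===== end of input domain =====

-- B replaces A's two index loops (parity partition into terms/definitions, then zip
-- by index) by one structural recursion pairing elements two at a time: simpler.

-- ===== PORT A =====
-- state of the first loop: (defintions, terms), in Python declaration order.
-- info.getD i "" is exact here: the first loop only indexes i < len(info);
-- the second loop's defintions[i] goes out of range exactly on odd-length input
-- (Python raises IndexError there) — those inputs are excluded by Pre_.
def data_collect (info : List String) : List (List String) :=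
  let dt := (List.range info.length).foldl
    (fun (st : List String × List String) i =>
      if i % 2 == 0 then (st.1, st.2 ++ [info.getD i "" ++ " "])
      else (st.1 ++ [info.getD i ""], st.2)) ([], [])
  (List.range dt.2.length).foldl
    (fun q i => q ++ [[dt.2.getD i "", dt.1.getD i ""]]) []

-- ===== PORT B =====
-- the while loop of B; info.getD (i+1) "" is exact inside Pre_ (even length):
-- Python's info[i + 1] raises IndexError only on odd-length input, outside Pre_.
def data_collect_alt_loop (info : List String) (i : Nat) (q : List (List String)) : List (List String) :=
  if i < info.length then
    data_collect_alt_loop info (i + 2) (q ++ [[info.getD i "" ++ " ", info.getD (i + 1) ""]])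
  else q
termination_by info.length - i

def data_collect_alt (info : List String) : List (List String) :=
  data_collect_alt_loop info 0 []

-- ===== PRECONDITION & SPEC =====
-- Pre_ excludes odd-length inputs: there Python A raises IndexError (its second
-- loop reads one more definition than exists).
def Pre_data_collect (info : List String) : Prop := info.length % 2 = 0
instance (info : List String) : Decidable (Pre_data_collect info) := by
  unfold Pre_data_collect; infer_instance
def pvWitness_data_collect : List String := ["ab", "cd"]

def Spec_data_collect (info : List String) (out : List (List String)) : Prop :=
  out = data_collect_alt info
instance (info : List String) (out : List (List String)) : Decidable (Spec_data_collect info out) := by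
  unfold Spec_data_collect; infer_instance

-- ===== CLAIM =====
def Claim_equal_data_collect : Prop :=
  ∀ (info : List String), Dom_data_collect info → Pre_data_collect info →
    Spec_data_collect info (data_collect info)

-- ===== LEMMAS AND PROOFS =====

-- the first loop of A, computed in closed form
theorem fold1_eq (n : Nat) (g : Nat → String) (d0 t0 : List String) :
    (List.range n).foldl
      (fun (st : List String × List String) i =>
        if i % 2 == 0 then (st.1, st.2 ++ [g i ++ " "])
        else (st.1 ++ [g i], st.2)) (d0, t0)
    = (d0 ++ ((List.range n).filter (fun i => !(i % 2 == 0))).map g,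
       t0 ++ ((List.range n).filter (fun i => i % 2 == 0)).map (fun i => g i ++ " ")) := by
  induction n with
  | zero => simp
  | succ n ih =>
    rw [List.range_succ, List.foldl_append, ih]
    by_cases h : n % 2 = 0 <;> simp [h, List.filter_append]

theorem filter_even_range (m : Nat) :
    (List.range (2 * m)).filter (fun i => i % 2 == 0)
      = (List.range m).map (fun j => 2 * j) := by
  induction m with
  | zero => simp
  | succ m ih =>
    have h2 : 2 * (m + 1) = (2 * m + 1) + 1 := by omega
    rw [h2, List.range_succ, List.range_succ, List.filter_append, List.filter_append, ih,
        List.range_succ, List.map_append]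
    simp [Nat.add_mod, Nat.mul_mod_right]

theorem filter_odd_range (m : Nat) :
    (List.range (2 * m)).filter (fun i => !(i % 2 == 0))
      = (List.range m).map (fun j => 2 * j + 1) := by
  induction m with
  | zero => simp
  | succ m ih =>
    have h2 : 2 * (m + 1) = (2 * m + 1) + 1 := by omega
    rw [h2, List.range_succ, List.range_succ, List.filter_append, List.filter_append, ih,
        List.range_succ, List.map_append]
    simp [Nat.add_mod, Nat.mul_mod_right]

-- the while loop of B, in closed form (on even-length input)
theorem altLoop_eq (l : List String) :
    ∀ (k i : Nat) (q : List (List String)), i + 2 * k = l.length →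
    data_collect_alt_loop l i q
      = q ++ (List.range k).map (fun j => [l.getD (i + 2 * j) "" ++ " ", l.getD (i + 2 * j + 1) ""]) := by
  intro k
  induction k with
  | zero =>
    intro i q h
    rw [data_collect_alt_loop]
    simp [show ¬ i < l.length by omega]
  | succ k ih =>
    intro i q h
    rw [data_collect_alt_loop, if_pos (by omega : i < l.length),
        ih (i + 2) _ (by omega), List.range_succ_eq_map, List.map_cons, List.map_map]
    have hmap : (List.range k).map
          ((fun j => [l.getD (i + 2 * j) "" ++ " ", l.getD (i + 2 * j + 1) ""]) ∘ Nat.succ)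
        = (List.range k).map (fun j => [l.getD (i + 2 + 2 * j) "" ++ " ", l.getD (i + 2 + 2 * j + 1) ""]) := by
      refine List.map_congr_left (fun j _ => ?_)
      have e1 : i + 2 * Nat.succ j = i + 2 + 2 * j := by omega
      simp [Function.comp, e1]
    rw [hmap]
    simp

theorem data_collect_even (m : Nat) (l : List String) (hl : l.length = 2 * m) :
    data_collect l = data_collect_alt l := by
  unfold data_collect
  rw [hl, fold1_eq, filter_even_range, filter_odd_range]
  simp only [List.nil_append, List.map_map]
  rw [PySem.List.foldl_append_singleton_eq_map]
  simp only [List.nil_append, List.length_map, List.length_range]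
  unfold data_collect_alt
  rw [altLoop_eq l m 0 [] (by omega), List.nil_append]
  refine List.map_congr_left (fun i hi => ?_)
  have hi' : i < m := List.mem_range.mp hi
  rw [PySem.List.getD_map_range _ _ _ _ hi', PySem.List.getD_map_range _ _ _ _ hi']
  simp

-- ===== VERDICT =====
theorem data_collect_spec : Claim_equal_data_collect := by
  intro info _ hpre
  unfold Pre_data_collect at hpre
  unfold Spec_data_collect
  obtain ⟨m, hm⟩ : ∃ m, info.length = 2 * m := ⟨info.length / 2, by omega⟩
  exact data_collect_even m info hm
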